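-- pv_equiv track=rewrite | github.com/ShadowPrince001/Timetable | genetic_timetable_generator.py | _count_teacher_conflicts
-- ===== SOURCE A (Python) =====
-- from typing import List, Dict, Tuple, Optional
--
-- def _count_teacher_conflicts(solution: List) -> int:
--     """Count teacher scheduling conflicts"""
--     teacher_time = {}
--     conflicts = 0
--
--     for assignment in solution:
--         key = (assignment['time_slot_id'], assignment['teacher_id'])
--         if key in teacher_time:
--             conflicts += 1
--         else:
--             teacher_time[key] = assignment
--
--     return conflicts
-- ===== SOURCE B (Python) =====
-- def _count_teacher_conflicts(solution):
--     """Count teacher scheduling conflicts"""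
--     keys = sorted((a['time_slot_id'], a['teacher_id']) for a in solution)
--     return sum(1 for x, y in zip(keys, keys[1:]) if x == y)
-- ===== Notes on version B (the rewrite author's own statement) =====
-- stated objective: alternative
-- what changed: B sorts the list of (time_slot_id, teacher_id) keys and counts adjacent equal pairs in the sorted list, instead of A's single pass that grows a seen-dict and bumps a counter on each membership hit.
import Mathlib
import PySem

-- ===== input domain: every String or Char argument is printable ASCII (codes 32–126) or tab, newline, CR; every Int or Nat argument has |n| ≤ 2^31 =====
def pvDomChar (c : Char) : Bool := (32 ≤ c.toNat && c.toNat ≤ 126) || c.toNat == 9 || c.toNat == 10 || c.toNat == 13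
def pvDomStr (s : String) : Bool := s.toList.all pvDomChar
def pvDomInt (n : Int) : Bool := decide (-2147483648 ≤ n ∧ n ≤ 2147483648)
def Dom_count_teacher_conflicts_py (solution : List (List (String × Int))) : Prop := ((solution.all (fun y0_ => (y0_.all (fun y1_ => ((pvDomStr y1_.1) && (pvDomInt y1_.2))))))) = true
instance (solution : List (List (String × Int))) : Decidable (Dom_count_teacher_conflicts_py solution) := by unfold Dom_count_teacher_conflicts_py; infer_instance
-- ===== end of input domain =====

-- B sorts the (time_slot_id, teacher_id) keys and counts adjacent equal pairs, instead of
-- A's seen-dict pass with a conflict branch (objective: alternative algorithm, same result).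

-- shared helper: both Pythons subscript the assignment dict with the two key strings
def pvKeyOf (a : List (String × Int)) : Int × Int :=
  (((PySem.Dict.mk a).get? "time_slot_id").getD 0, ((PySem.Dict.mk a).get? "teacher_id").getD 0)

-- ===== PORT A =====
def count_teacher_conflicts_py (solution : List (List (String × Int))) : Int :=
  (solution.foldl
    (fun (st : PySem.Dict (Int × Int) (List (String × Int)) × Int) assignment =>
      let key := pvKeyOf assignment
      if st.1.contains key then (st.1, st.2 + 1)
      else (st.1.insert key assignment, st.2))
    (PySem.Dict.empty, 0)).2

-- ===== PORT B =====
-- keys[1:] is ported as keys.drop 1 (exact for the literal nonneg index 1);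
-- sum(1 for … if x == y) over zip(keys, keys[1:]) is the countP of the zipped list.
def count_teacher_conflicts_py_alt (solution : List (List (String × Int))) : Int :=
  let keys := PySem.List.sorted2 (solution.map pvKeyOf) Prod.fst Prod.snd
  ((keys.zip (keys.drop 1)).countP (fun p => p.1 == p.2) : Int)

-- ===== PRECONDITION & SPEC =====
-- Pre_ excludes rows missing the 'time_slot_id' or 'teacher_id' key, where Python A raises KeyError.
def Pre_count_teacher_conflicts_py (solution : List (List (String × Int))) : Prop :=
  (solution.all (fun a =>
    (PySem.Dict.mk a).contains "time_slot_id" && (PySem.Dict.mk a).contains "teacher_id")) = true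
instance (solution : List (List (String × Int))) : Decidable (Pre_count_teacher_conflicts_py solution) := by unfold Pre_count_teacher_conflicts_py; infer_instance

def pvWitness_count_teacher_conflicts_py : (List (List (String × Int))) :=
  [[("time_slot_id", 1), ("teacher_id", 2)], [("time_slot_id", 1), ("teacher_id", 2)]]

def Spec_count_teacher_conflicts_py (solution : List (List (String × Int))) (out : Int) : Prop := out = count_teacher_conflicts_py_alt solution
instance (solution : List (List (String × Int))) (out : Int) : Decidable (Spec_count_teacher_conflicts_py solution out) := by unfold Spec_count_teacher_conflicts_py; infer_instance

-- ===== CLAIM (what is proved, stated in full; the proofs are below) =====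
def Claim_equal_count_teacher_conflicts_py : Prop := ∀ (solution : List (List (String × Int))), Dom_count_teacher_conflicts_py solution → Pre_count_teacher_conflicts_py solution → Spec_count_teacher_conflicts_py solution (count_teacher_conflicts_py solution)

-- ===== LEMMAS AND PROOFS =====

-- Loop invariant for A's fold: conflicts counted so far + distinct keys seen = start + total keys + keys seen at start.
theorem ctc_fold_invariant (l : List (List (String × Int)))
    (d : PySem.Dict (Int × Int) (List (String × Int))) (c : Int) (hnd : d.keys.Nodup) :
    (l.foldl
      (fun (st : PySem.Dict (Int × Int) (List (String × Int)) × Int) assignment =>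
        let key := pvKeyOf assignment
        if st.1.contains key then (st.1, st.2 + 1)
        else (st.1.insert key assignment, st.2))
      (d, c)).2
      + ((PySem.Set.update d.keys (l.map pvKeyOf)).length : Int)
    = c + (l.length : Int) + (d.keys.length : Int) := by
  induction l generalizing d c with
  | nil =>
      simp [PySem.Set.update]
  | cons a l ih =>
      by_cases hmem : pvKeyOf a ∈ d.keys
      · have hc : d.contains (pvKeyOf a) = true := by
          rw [PySem.Dict.contains_iff_mem_keys]; exact hmem
        simp only [List.foldl_cons, List.map_cons, hc, if_true, PySem.Set.update_cons,
          PySem.Set.add_of_mem hmem]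
        have := ih d (c + 1) hnd
        simp only [List.length_cons] at *
        push_cast at *
        linarith
      · have hc : d.contains (pvKeyOf a) = false := by
          rw [Bool.eq_false_iff]
          intro h
          exact hmem ((PySem.Dict.contains_iff_mem_keys d _).mp h)
        have hkeys : (d.insert (pvKeyOf a) a).keys = d.keys ++ [pvKeyOf a] :=
          PySem.Dict.keys_insert_of_not_contains d a hc
        have hnd' : (d.insert (pvKeyOf a) a).keys.Nodup :=
          PySem.Dict.nodup_keys_insert d _ _ hnd
        simp only [List.foldl_cons, List.map_cons, hc, PySem.Set.update_cons]
        have hadd : PySem.Set.add d.keys (pvKeyOf a) = d.keys ++ [pvKeyOf a] :=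
          PySem.Set.add_of_not_mem hmem
        have := ih (d.insert (pvKeyOf a) a) c hnd'
        rw [hkeys] at this
        rw [hadd]
        simp only [List.length_cons, List.length_append, List.length_nil] at *
        push_cast at *
        linarith

-- the comparator sorted2 keys Prod.fst Prod.snd uses, and the (non-strict) order it sorts by
def pvBefore (a b : Int × Int) : Bool :=
  decide (a.1 < b.1) || !decide (b.1 < a.1) && decide (a.2 < b.2)

def pvLexLE (a b : Int × Int) : Prop := a.1 < b.1 ∨ (a.1 = b.1 ∧ a.2 ≤ b.2)

theorem pvLexLE_of_before_true {a b : Int × Int} (h : pvBefore a b = true) : pvLexLE a b := by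
  unfold pvBefore at h; unfold pvLexLE
  simp only [Bool.or_eq_true, Bool.and_eq_true, Bool.not_eq_true', decide_eq_true_eq,
    decide_eq_false_iff_not] at h
  omega

theorem pvLexLE_of_before_false {a b : Int × Int} (h : pvBefore a b = false) : pvLexLE b a := by
  unfold pvBefore at h; unfold pvLexLE
  simp only [Bool.or_eq_false_iff, Bool.and_eq_false_iff, Bool.not_eq_false',
    decide_eq_true_eq, decide_eq_false_iff_not] at h
  omega

theorem pvLexLE_trans {a b c : Int × Int} (h1 : pvLexLE a b) (h2 : pvLexLE b c) : pvLexLE a c := by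
  unfold pvLexLE at *; omega

theorem pvLexLE_antisymm {a b : Int × Int} (h1 : pvLexLE a b) (h2 : pvLexLE b a) : a = b := by
  unfold pvLexLE at *
  have h3 : a.1 = b.1 ∧ a.2 = b.2 := by omega
  exact Prod.ext h3.1 h3.2

theorem pv_insertBy_pairwise (x : Int × Int) (ys : List (Int × Int))
    (hp : ys.Pairwise pvLexLE) :
    (PySem.List.insertBy pvBefore x ys).Pairwise pvLexLE := by
  induction ys with
  | nil => simp [PySem.List.insertBy]
  | cons y ys ih =>
      rw [List.pairwise_cons] at hp
      by_cases hb : pvBefore x y = true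
      · simp only [PySem.List.insertBy, hb, if_true]
        refine List.Pairwise.cons ?_ (List.pairwise_cons.mpr hp)
        intro z hz
        rcases List.mem_cons.mp hz with rfl | hz
        · exact pvLexLE_of_before_true hb
        · exact pvLexLE_trans (pvLexLE_of_before_true hb) (hp.1 z hz)
      · rw [Bool.not_eq_true] at hb
        simp only [PySem.List.insertBy, hb, Bool.false_eq_true, if_false]
        refine List.Pairwise.cons ?_ (ih hp.2)
        intro z hz
        rcases (PySem.List.mem_insertBy _ _ _ _).mp hz with rfl | hz
        · exact pvLexLE_of_before_false hb
        · exact hp.1 z hz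

theorem pv_foldl_insertBy_pairwise (l : List (Int × Int)) (acc : List (Int × Int))
    (h : acc.Pairwise pvLexLE) :
    (l.foldl (fun acc x => PySem.List.insertBy pvBefore x acc) acc).Pairwise pvLexLE := by
  induction l generalizing acc with
  | nil => exact h
  | cons a l ih => exact ih _ (pv_insertBy_pairwise a acc h)

theorem pv_sorted2_pairwise (l : List (Int × Int)) :
    (PySem.List.sorted2 l Prod.fst Prod.snd).Pairwise pvLexLE := by
  show (l.foldl (fun acc x => PySem.List.insertBy pvBefore x acc) []).Pairwise pvLexLE
  exact pv_foldl_insertBy_pairwise l [] List.Pairwise.nil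

-- adjacent equal pairs of a pvLexLE-sorted list count exactly the non-first duplicates
theorem pv_adj_sorted (s : List (Int × Int)) (hs : s.Pairwise pvLexLE) :
    (((s.zip (s.drop 1)).countP (fun p => p.1 == p.2) : Nat) : Int)
      + (s.toFinset.card : Int) = (s.length : Int) := by
  induction s with
  | nil => simp
  | cons a s ih =>
      cases s with
      | nil => simp
      | cons b t =>
          rw [List.pairwise_cons] at hs
          have hzip : ((a :: b :: t).zip ((a :: b :: t).drop 1))
              = (a, b) :: ((b :: t).zip t) := by simp
          have htz : ((b :: t).zip ((b :: t).drop 1)) = ((b :: t).zip t) := by simp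
          have ihs := ih hs.2
          rw [htz] at ihs
          by_cases hab : a = b
          · subst hab
            have hmem : a ∈ (a :: t).toFinset := by simp
            rw [hzip, List.countP_cons]
            simp only [beq_self_eq_true, if_pos, List.toFinset_cons]
            rw [Finset.insert_eq_self.mpr (by simp)]
            simp only [List.toFinset_cons] at ihs
            simp only [List.length_cons] at *
            push_cast at *
            omega
          · have hnotmem : a ∉ (b :: t) := by
              intro hm
              rcases List.mem_cons.mp hm with rfl | hmt
              · exact hab rfl
              · have h1 : pvLexLE a b := hs.1 b (by simp)
                have h2 : pvLexLE b a := (List.pairwise_cons.mp hs.2).1 a hmt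
                exact hab (pvLexLE_antisymm h1 h2)
            rw [hzip, List.countP_cons]
            have hne : ((a, b).1 == (a, b).2) = false := by
              simp only [beq_eq_false_iff_ne, ne_eq]; exact hab
            rw [hne]
            simp only [List.toFinset_cons] at *
            rw [Finset.card_insert_of_notMem (by simp [List.mem_toFinset] at *; tauto)]
            simp only [List.length_cons] at *
            push_cast at *
            omega

-- number of distinct elements: |set(l)| = l.toFinset.card
theorem pv_ofList_length_eq_card (l : List (Int × Int)) :
    ((PySem.Set.ofList l).length : Int) = (l.toFinset.card : Int) := by
  have hnd : (PySem.Set.ofList l).Nodup := PySem.Set.nodup_ofList l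
  have hfs : (PySem.Set.ofList l).toFinset = l.toFinset := by
    ext x
    simp only [List.mem_toFinset]
    exact PySem.Set.mem_ofList l x
  have := List.toFinset_card_of_nodup hnd
  rw [hfs] at this
  exact_mod_cast this.symm

-- ===== VERDICT (by name: the statement is the Claim_ definition above) =====
theorem count_teacher_conflicts_py_spec : Claim_equal_count_teacher_conflicts_py := by
  intro solution _ _
  unfold Spec_count_teacher_conflicts_py count_teacher_conflicts_py count_teacher_conflicts_py_alt
  -- A's side: fold invariant on the empty dict
  have hA := ctc_fold_invariant solution PySem.Dict.empty 0 (by simp [PySem.Dict.keys_empty])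
  rw [show (PySem.Dict.empty : PySem.Dict (Int × Int) (List (String × Int))).keys = ([] : List (Int × Int)) from rfl] at hA
  rw [PySem.Set.update_nil_left] at hA
  -- B's side: sorted list, adjacent duplicates
  have hB := pv_adj_sorted (PySem.List.sorted2 (solution.map pvKeyOf) Prod.fst Prod.snd)
    (pv_sorted2_pairwise (solution.map pvKeyOf))
  have hperm : (PySem.List.sorted2 (solution.map pvKeyOf) Prod.fst Prod.snd).Perm
      (solution.map pvKeyOf) := PySem.List.sorted2_perm _ Prod.fst Prod.snd false
  have hlen := hperm.length_eq
  have hfin := List.toFinset_eq_of_perm _ _ hperm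
  have hcard := pv_ofList_length_eq_card (solution.map pvKeyOf)
  rw [hlen, hfin] at hB
  simp only [List.length_nil, List.length_map] at hA hB
  push_cast at hA hB hcard ⊢
  omega
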